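-- pv_equiv track=rewrite | github.com/Davit00tar/Anaconda-SpecOps-Training | final.py | smal_mult
-- ===== SOURCE A (Python) =====
-- def rem_dup(data):
--     return list(set(data))
--
-- def smal_mult(n):
--     answer = 1
--     lst = []
--     for i in range(2,n + 1):
--         divider = 2
--         num = i
--         while num > 1:
--             if num % divider == 0:
--                 lst.append(divider)
--                 num //= divider
--             else:
--                 divider += 1
--     lst = rem_dup(lst)
--     for i in lst:
--         answer *= i
--     return answer
-- ===== SOURCE B (Python) =====
-- def _is_prime(i):
--     d = 2
--     while d * d <= i:
--         if i % d == 0: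
--             return False
--         d += 1
--     return True
--
-- def smal_mult(n):
--     answer = 1
--     for i in range(2, n + 1):
--         if _is_prime(i):
--             answer *= i
--     return answer
-- ===== Notes on version B (the rewrite author's own statement) =====
-- stated objective: faster
-- what changed: Instead of fully factorizing every i in [2,n] by trial division, collecting all prime factors in a list, deduplicating through a set and multiplying, B tests each i for primality directly (trial division only up to sqrt(i), stopping at the first divisor) and multiplies the primes into the answer as it goes, with no list and no dedup.
import Mathlib
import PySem

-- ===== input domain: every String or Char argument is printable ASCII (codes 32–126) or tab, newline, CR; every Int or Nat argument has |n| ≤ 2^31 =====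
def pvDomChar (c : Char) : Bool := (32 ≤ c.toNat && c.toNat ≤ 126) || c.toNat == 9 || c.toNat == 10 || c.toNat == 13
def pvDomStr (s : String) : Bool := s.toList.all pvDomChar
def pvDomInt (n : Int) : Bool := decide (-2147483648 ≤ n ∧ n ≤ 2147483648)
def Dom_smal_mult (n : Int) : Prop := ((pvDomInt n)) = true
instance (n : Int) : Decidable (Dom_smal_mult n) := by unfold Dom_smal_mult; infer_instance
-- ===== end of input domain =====

-- B replaces A's full trial-division factorization of every i ≤ n (collect all prime factors, dedupe via a
-- set, multiply) by a direct primality test per i (trial division up to √i), multiplying primes as it goes.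

-- ===== PORT A =====
-- the inner 'while num > 1' loop of A; the Nat fuel is only a totality guard (the Python loop terminates)
def facLoop : Nat → Int → Int → List Int → List Int
  | 0, _, _, lst => lst
  | fuel + 1, divider, num, lst =>
    if 1 < num then
      if PySem.Int.mod num divider = 0 then
        facLoop fuel divider (PySem.Int.floordiv num divider) (lst ++ [divider])
      else
        facLoop fuel (divider + 1) num lst
    else lst

-- rem_dup(data) = list(set(data)); it is consumed only by an order-independent product below
def rem_dup (data : List Int) : List Int := PySem.Set.ofList data

def smal_mult (n : Int) : Int :=
  let lst := (PySem.List.pyRange 2 (n + 1) 1).foldl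
    (fun lst i => facLoop (2 * i.toNat + 1) 2 i lst) []
  let lst2 := rem_dup lst
  lst2.foldl (fun answer i => answer * i) 1

-- ===== PORT B =====
-- the 'while d * d <= i' loop of _is_prime; the Nat fuel is only a totality guard
def isPrimeLoop : Nat → Int → Int → Bool
  | 0, _, _ => true
  | fuel + 1, d, i =>
    if d * d ≤ i then
      if PySem.Int.mod i d = 0 then false
      else isPrimeLoop fuel (d + 1) i
    else true

def smal_mult_alt (n : Int) : Int :=
  (PySem.List.pyRange 2 (n + 1) 1).foldl
    (fun answer i => if isPrimeLoop (i.toNat + 1) 2 i then answer * i else answer) 1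

-- ===== PRECONDITION & SPEC =====
def Spec_smal_mult (n : Int) (out : Int) : Prop := out = smal_mult_alt n
instance (n : Int) (out : Int) : Decidable (Spec_smal_mult n out) := by unfold Spec_smal_mult; infer_instance

-- ===== CLAIM (what is proved, stated in full; the proofs are below) =====
def Claim_equal_smal_mult : Prop := ∀ (n : Int), Dom_smal_mult n → Spec_smal_mult n (smal_mult n)

-- ===== LEMMAS AND PROOFS =====

-- the common value both programs compute: the product of the distinct primes below m
def primorialBelow (m : ℕ) : ℤ := ∏ p ∈ Nat.primesBelow m, (p : ℤ)

theorem primesBelow_le_two (m : ℕ) (h : m ≤ 2) : Nat.primesBelow m = ∅ := by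
  ext p
  simp only [Nat.mem_primesBelow, Finset.notMem_empty, iff_false, not_and]
  intro hp hpr
  exact absurd hpr.two_le (by omega)


-- unfolding equation of Nat.primeFactorsList for n ≥ 2 (Mathlib does not name it directly)
theorem primeFactorsList_eq_cons (n : ℕ) (h : 2 ≤ n) :
    n.primeFactorsList = n.minFac :: (n / n.minFac).primeFactorsList := by
  obtain ⟨k, rfl⟩ : ∃ k, n = k + 2 := ⟨n - 2, by omega⟩
  rw [Nat.primeFactorsList]


-- A's inner loop, started at divider D with no divisor of N below D, appends N's prime factorization
theorem facLoop_eq (fuel : ℕ) : ∀ (N D : ℕ) (lst : List Int), 1 ≤ N → 2 ≤ D →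
    (∀ k, 2 ≤ k → k < D → ¬ k ∣ N) → 2 * N + 2 ≤ fuel + D →
    facLoop fuel (D : Int) (N : Int) lst = lst ++ N.primeFactorsList.map (fun p : ℕ => (p : Int)) := by
  induction fuel with
  | zero =>
    intro N D lst hN hD hinv hfuel
    by_cases h1 : N = 1
    · subst h1; simp [facLoop, Nat.primeFactorsList_one]
    · have h2 : 2 ≤ N := by omega
      exact absurd (Nat.minFac_dvd N)
        (hinv _ (Nat.minFac_prime h1).two_le (by have := Nat.minFac_le (by omega : 0 < N); omega))
  | succ fuel ih =>
    intro N D lst hN hD hinv hfuel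
    by_cases h1 : N = 1
    · subst h1; simp [facLoop, Nat.primeFactorsList_one]
    · have h2 : 2 ≤ N := by omega
      have hlt : (1 : Int) < (N : Int) := by exact_mod_cast h2.trans_lt' (by omega)
      rw [facLoop, if_pos hlt, PySem.Int.mod_natCast]
      by_cases hdvd : D ∣ N
      · have hmod : N % D = 0 := Nat.dvd_iff_mod_eq_zero.mp hdvd
        rw [if_pos (by exact_mod_cast congrArg (Nat.cast : ℕ → ℤ) hmod), PySem.Int.floordiv_natCast]
        have hDle : D ≤ N := Nat.le_of_dvd (by omega) hdvd
        have hmf : N.minFac = D := by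
          have hle : N.minFac ≤ D := Nat.minFac_le_of_dvd hD hdvd
          rcases Nat.lt_or_ge N.minFac D with hlt' | hge
          · exact absurd (Nat.minFac_dvd N) (hinv _ (Nat.minFac_prime h1).two_le hlt')
          · omega
        have hpos : 1 ≤ N / D := Nat.one_le_div_iff (by omega) |>.mpr hDle
        have hhalf : 2 * (N / D) ≤ N := by
          have h22 : N / D ≤ N / 2 := Nat.div_le_div_left hD (by omega)
          have := Nat.div_mul_le_self N 2
          omega
        rw [ih (N / D) D (lst ++ [(D : Int)]) hpos hD
          (fun k hk2 hkD hkdvd => hinv k hk2 hkD (hkdvd.trans (Nat.div_dvd_of_dvd hdvd)))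
          (by omega)]
        rw [primeFactorsList_eq_cons N h2, hmf]
        simp
      · have hmod : ¬ ((N : ℤ) % (D : ℤ)) = 0 := by
          rw [← Int.natCast_mod]
          exact_mod_cast fun h => hdvd (Nat.dvd_of_mod_eq_zero (by exact_mod_cast h))
        rw [if_neg (by exact_mod_cast hmod)]
        have : ((D : Int) + 1) = ((D + 1 : ℕ) : Int) := by push_cast; ring
        rw [this, ih N (D + 1) lst hN (by omega)
          (fun k hk2 hkD hkdvd => by
            rcases Nat.lt_or_ge k D with h | h
            · exact hinv k hk2 h hkdvd
            · have : k = D := by omega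
              subst this; exact hdvd hkdvd)
          (by omega)]

-- if no k with 2 ≤ k < D divides N and D*D > N then N is prime
theorem prime_of_no_small_divisor (N D : ℕ) (hN : 2 ≤ N)
    (hinv : ∀ k, 2 ≤ k → k < D → ¬ k ∣ N) (hD2 : ¬ D * D ≤ N) : N.Prime := by
  by_contra hnp
  have hsq : N.minFac * N.minFac ≤ N := by
    have := Nat.minFac_sq_le_self (by omega : 0 < N) hnp
    nlinarith [this]
  have hmf2 : 2 ≤ N.minFac := (Nat.minFac_prime (by omega : N ≠ 1)).two_le
  rcases Nat.lt_or_ge N.minFac D with hlt | hge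
  · exact hinv _ hmf2 hlt (Nat.minFac_dvd N)
  · exact hD2 (le_trans (Nat.mul_le_mul hge hge) hsq)


-- B's inner loop is a primality test
theorem isPrimeLoop_eq (fuel : ℕ) : ∀ (N D : ℕ), 2 ≤ N → 2 ≤ D →
    (∀ k, 2 ≤ k → k < D → ¬ k ∣ N) → N + 2 ≤ fuel + D →
    (isPrimeLoop fuel (D : Int) (N : Int) = true ↔ N.Prime) := by
  induction fuel with
  | zero =>
    intro N D hN hD hinv hfuel
    simp only [isPrimeLoop, true_iff]
    exact prime_of_no_small_divisor N D hN hinv (by nlinarith)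
  | succ fuel ih =>
    intro N D hN hD hinv hfuel
    rw [isPrimeLoop]
    by_cases hsq : D * D ≤ N
    · rw [if_pos (by exact_mod_cast hsq), PySem.Int.mod_natCast]
      by_cases hdvd : D ∣ N
      · have hmod : N % D = 0 := Nat.dvd_iff_mod_eq_zero.mp hdvd
        rw [if_pos (by exact_mod_cast congrArg (Nat.cast : ℕ → ℤ) hmod)]
        simp only [Bool.false_eq_true, false_iff]
        intro hp
        have hDN : D < N := by nlinarith
        rcases (Nat.Prime.eq_one_or_self_of_dvd hp D hdvd) with h | h <;> omega
      · have hmod : ¬ ((N : ℤ) % (D : ℤ)) = 0 := by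
          rw [← Int.natCast_mod]
          exact_mod_cast fun h => hdvd (Nat.dvd_of_mod_eq_zero (by exact_mod_cast h))
        rw [if_neg (by exact_mod_cast hmod)]
        have : ((D : Int) + 1) = ((D + 1 : ℕ) : Int) := by push_cast; ring
        rw [this]
        exact ih N (D + 1) hN (by omega)
          (fun k hk2 hkD hkdvd => by
            rcases Nat.lt_or_ge k D with h | h
            · exact hinv k hk2 h hkdvd
            · have : k = D := by omega
              subst this; exact hdvd hkdvd)
          (by omega)
    · rw [if_neg (by exact_mod_cast hsq)]
      simp only [true_iff]
      exact prime_of_no_small_divisor N D hN hinv hsq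

theorem primorialBelow_succ (m : ℕ) :
    primorialBelow (m + 1) = if m.Prime then primorialBelow m * (m : ℤ) else primorialBelow m := by
  unfold primorialBelow
  rw [Nat.primesBelow_succ]
  by_cases hp : m.Prime
  · rw [if_pos hp, if_pos hp, Finset.prod_insert (by simp [Nat.mem_primesBelow])]
    ring
  · rw [if_neg hp, if_neg hp]


-- B's fold over range(2, m+1) computes the primorial
theorem alt_fold (m : ℕ) :
    (PySem.List.pyRange 2 ((m : Int) + 1) 1).foldl
      (fun answer i => if isPrimeLoop (i.toNat + 1) 2 i then answer * i else answer) 1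
      = primorialBelow (m + 1) := by
  induction m with
  | zero =>
    rw [PySem.List.pyRange_one_eq_nil (by omega)]
    simp [primorialBelow, primesBelow_le_two 1 (by omega)]
  | succ m ih =>
    by_cases hm : m = 0
    · subst hm
      rw [PySem.List.pyRange_one_eq_nil (by omega)]
      simp [primorialBelow, primesBelow_le_two 2 (by omega)]
    · have h1 : 1 ≤ m := by omega
      have hcast : ((m + 1 : ℕ) : Int) + 1 = ((m : Int) + 1) + 1 := by push_cast; ring
      rw [hcast, PySem.List.pyRange_one_succ_right (by exact_mod_cast by omega : (2:Int) ≤ (m:Int) + 1),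
        List.foldl_append, ih]
      have hcond : isPrimeLoop (((m : Int) + 1).toNat + 1) 2 ((m : Int) + 1) = true ↔ (m + 1).Prime := by
        have e1 : ((m : Int) + 1).toNat + 1 = m + 2 := by omega
        have e2 : ((m : Int) + 1) = (((m + 1 : ℕ)) : Int) := by push_cast; ring
        have e3 : (2 : Int) = ((2 : ℕ) : Int) := by norm_num
        rw [e1, e2, e3]
        exact isPrimeLoop_eq (m + 2) (m + 1) 2 (by omega) (by omega)
          (fun k hk2 hkD _ => absurd hkD (by omega)) (by omega)
      conv_rhs => rw [primorialBelow_succ]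
      simp only [List.foldl_cons, List.foldl_nil]
      by_cases hp : (m + 1).Prime
      · rw [if_pos (hcond.mpr hp), if_pos hp]; push_cast; ring
      · rw [if_neg (fun h => hp (hcond.mp h)), if_neg hp]


theorem smal_mult_alt_eq_primorial (n : Int) : smal_mult_alt n = primorialBelow (n + 1).toNat := by
  unfold smal_mult_alt
  by_cases hn : n < 2
  · rw [PySem.List.pyRange_one_eq_nil (by omega)]
    simp [primorialBelow, primesBelow_le_two (n+1).toNat (by omega)]
  · have hm : n = ((n.toNat : ℕ) : Int) := by omega
    have : (n + 1).toNat = n.toNat + 1 := by omega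
    rw [this, hm]
    exact alt_fold n.toNat

theorem smal_mult_eq_primorial (n : Int) : smal_mult n = primorialBelow (n + 1).toNat := by
  unfold smal_mult
  by_cases hn : n < 2
  · rw [PySem.List.pyRange_one_eq_nil (by omega)]
    simp [rem_dup, PySem.Set.ofList, primorialBelow, primesBelow_le_two (n + 1).toNat (by omega)]
  · have hstep : ∀ (acc : List ℤ), ∀ i ∈ PySem.List.pyRange 2 (n + 1) 1,
        facLoop (2 * i.toNat + 1) 2 i acc
          = acc ++ i.toNat.primeFactorsList.map (fun p : ℕ => (p : ℤ)) := by
      intro acc i hi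
      obtain ⟨h2, _⟩ := (PySem.List.mem_pyRange_one).mp hi
      have e : i = ((i.toNat : ℕ) : Int) := by omega
      have e2 : (2 : Int) = ((2 : ℕ) : Int) := by norm_num
      rw [e, e2]
      simp only [Int.toNat_natCast]
      exact facLoop_eq (2 * i.toNat + 1) i.toNat 2 acc (by omega) (by omega)
        (fun k hk2 hkD _ => absurd hkD (by omega)) (by omega)
    have hL : (PySem.List.pyRange 2 (n + 1) 1).foldl
        (fun lst i => facLoop (2 * i.toNat + 1) 2 i lst) []
        = (PySem.List.pyRange 2 (n + 1) 1).flatMap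
            (fun i => i.toNat.primeFactorsList.map (fun p : ℕ => (p : ℤ))) := by
      rw [PySem.List.foldl_congr_mem _ _ _ _ hstep, PySem.List.foldl_append_eq_flatMap]
      simp
    simp only [hL]
    set F := (Nat.primesBelow (n + 1).toNat).image (fun p : ℕ => (p : ℤ)) with hF
    set L := (PySem.List.pyRange 2 (n + 1) 1).flatMap
        (fun i => i.toNat.primeFactorsList.map (fun p : ℕ => (p : ℤ))) with hLdef
    have hmem : ∀ x, x ∈ rem_dup L ↔ x ∈ F := by
      intro x
      rw [rem_dup, PySem.Set.mem_ofList, hLdef, List.mem_flatMap, hF]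
      constructor
      · rintro ⟨i, hi, hx⟩
        obtain ⟨h2, hlt⟩ := (PySem.List.mem_pyRange_one).mp hi
        obtain ⟨p, hp, rfl⟩ := List.mem_map.mp hx
        obtain ⟨hpr, hdvd⟩ := (Nat.mem_primeFactorsList (by omega : i.toNat ≠ 0)).mp hp
        have hple : p ≤ i.toNat := Nat.le_of_dvd (by omega) hdvd
        exact Finset.mem_image.mpr ⟨p, Nat.mem_primesBelow.mpr ⟨by omega, hpr⟩, rfl⟩
      · intro hx
        obtain ⟨p, hp, rfl⟩ := Finset.mem_image.mp hx
        obtain ⟨hplt, hpr⟩ := Nat.mem_primesBelow.mp hp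
        refine ⟨(p : ℤ), PySem.List.mem_pyRange_one.mpr ⟨by exact_mod_cast hpr.two_le, by omega⟩, ?_⟩
        refine List.mem_map.mpr ⟨p, ?_, rfl⟩
        rw [Int.toNat_natCast, Nat.primeFactorsList_prime hpr]
        exact List.mem_singleton.mpr rfl
    have hperm : (rem_dup L).Perm F.toList := by
      refine List.perm_of_nodup_nodup_toFinset_eq (by rw [rem_dup]; exact PySem.Set.nodup_ofList L) F.nodup_toList ?_
      ext x
      simp only [List.mem_toFinset, Finset.mem_toList]
      exact hmem x
    calc (rem_dup L).foldl (fun answer i => answer * i) 1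
        = (rem_dup L).prod := List.prod_eq_foldl.symm
      _ = F.toList.prod := hperm.prod_eq
      _ = ∏ x ∈ F, x := Finset.prod_toList F
      _ = ∏ p ∈ Nat.primesBelow (n + 1).toNat, (p : ℤ) :=
          Finset.prod_image (fun a _ b _ h => by exact_mod_cast h)

-- ===== VERDICT (by name: the statement is the Claim_ definition above) =====
theorem smal_mult_spec : Claim_equal_smal_mult := by
  intro n _
  unfold Spec_smal_mult
  rw [smal_mult_eq_primorial, smal_mult_alt_eq_primorial]
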